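-- pv_equiv track=rewrite | github.com/omnify2026/DAACS | DAACS/daacs_v2-dy/daacs/graph/replanning.py | detect_failure_type
-- ===== SOURCE A (Python) =====
-- from typing import Dict, List, Optional, Any
--
-- def detect_failure_type(
--     failure_summary: List[str],
--     result: str
-- ) -> Optional[str]:
--     """
--     실패 요약과 결과에서 실패 유형 감지
--     Enhanced with more specific detection patterns
--     """
--     summary_text = " ".join(failure_summary).lower()
--
--     # 순서 중요 (특정 실패가 더 우선순위 높음)
--
--     # Combine summary and logs for better detection
--     combined_text = (summary_text + " " + result.lower())
--
--     # 1. 권한 오류 → 즉시 중단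
--     if "permission" in combined_text or "operation not permitted" in combined_text:
--         return "permission_denied"
--
--     # 2. 런타임/스모크/엔트리포인트 (서비스 실행 관련)
--     if "runtime_error" in summary_text or "runtime verification" in summary_text:
--         return "runtime_error"
--     if "frontend_smoke_failed" in summary_text or "smoke test" in summary_text:
--         return "frontend_smoke_failed"
--     if "entrypoint" in summary_text or "frontend_entrypoint" in summary_text:
--         return "frontend_entry_missing"
--
--     # 3. Code Review 실패 (품질 미달)
--     if "code_review_failed" in summary_text or "code_review_critical" in summary_text:
--         return "quality_issue"
--     if "code_review_goal_misalignment" in summary_text: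
--         return "goal_miss"
--
--     # 4. 파일 생성/파싱 실패
--     if "no files collected" in summary_text or "file parsing failed" in summary_text:
--         return "codegen_fail"
--     if "missing files" in summary_text or "empty files" in summary_text:
--         return "codegen_fail"
--     if "no_progress" in summary_text:
--         return "no_progress"
--
--     # 5. 일관성/호환성/네트워크 실패 (Phase 4 Trigger)
--     if "consistency" in summary_text or "compatibility" in summary_text:
--         return "endpoint_mismatch"
--
--     # 🆕 Check logs for Network Errors (Phase 4 Trigger)
--     network_keywords = ["404 not found", "connection refused", "network error", "fetch failed", "econnnrefused"]
--     if any(k in combined_text for k in network_keywords):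
--         return "endpoint_mismatch"
--
--     # 6. 빌드/배포/테스트/린트 (품질 관련)
--     if "deploy" in summary_text: return "deploy_fail"
--     if "build" in summary_text: return "build_fail"
--     if "refactor" in summary_text: return "refactor_fail"
--     if "tests" in summary_text or "test failed" in summary_text:
--         if "build failed" not in summary_text and "deploy failed" not in summary_text:
--             return "tests_fail"
--     if "lint" in summary_text: return "lint_fail"
--
--     # 7. 기타
--     if "quality" in summary_text or "score" in summary_text: return "quality_issue"
--     if "goal" in summary_text or "missing_feature" in summary_text: return "goal_miss"
--     if "endpoint" in summary_text or "api" in summary_text: return "endpoint_mismatch"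
--
--     # 기본값
--     return "verify_fail"
-- ===== SOURCE B (Python) =====
-- # Flat keyword -> (priority, scope, label) index scanned with a minimum-priority reduction
-- # instead of an ordered rule cascade; the original's "build failed"/"deploy failed" guard on
-- # the tests rule is dead code ("build"/"deploy" match at a higher priority), so B has no guard.
--
-- KEYWORD_INDEX = {
--     "permission": (0, True, "permission_denied"),
--     "operation not permitted": (0, True, "permission_denied"),
--     "runtime_error": (1, False, "runtime_error"),
--     "runtime verification": (1, False, "runtime_error"),
--     "frontend_smoke_failed": (2, False, "frontend_smoke_failed"),
--     "smoke test": (2, False, "frontend_smoke_failed"),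
--     "entrypoint": (3, False, "frontend_entry_missing"),
--     "frontend_entrypoint": (3, False, "frontend_entry_missing"),
--     "code_review_failed": (4, False, "quality_issue"),
--     "code_review_critical": (4, False, "quality_issue"),
--     "code_review_goal_misalignment": (5, False, "goal_miss"),
--     "no files collected": (6, False, "codegen_fail"),
--     "file parsing failed": (6, False, "codegen_fail"),
--     "missing files": (7, False, "codegen_fail"),
--     "empty files": (7, False, "codegen_fail"),
--     "no_progress": (8, False, "no_progress"),
--     "consistency": (9, False, "endpoint_mismatch"),
--     "compatibility": (9, False, "endpoint_mismatch"),
--     "404 not found": (10, True, "endpoint_mismatch"),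
--     "connection refused": (10, True, "endpoint_mismatch"),
--     "network error": (10, True, "endpoint_mismatch"),
--     "fetch failed": (10, True, "endpoint_mismatch"),
--     "econnnrefused": (10, True, "endpoint_mismatch"),
--     "deploy": (11, False, "deploy_fail"),
--     "build": (12, False, "build_fail"),
--     "refactor": (13, False, "refactor_fail"),
--     "tests": (14, False, "tests_fail"),
--     "test failed": (14, False, "tests_fail"),
--     "lint": (15, False, "lint_fail"),
--     "quality": (16, False, "quality_issue"),
--     "score": (16, False, "quality_issue"),
--     "goal": (17, False, "goal_miss"),
--     "missing_feature": (17, False, "goal_miss"),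
--     "endpoint": (18, False, "endpoint_mismatch"),
--     "api": (18, False, "endpoint_mismatch"),
-- }
--
--
-- def detect_failure_type(failure_summary, result):
--     summary_text = " ".join(failure_summary).lower()
--     combined_text = summary_text + " " + result.lower()
--     best = None
--     for kw, (prio, in_combined, label) in KEYWORD_INDEX.items():
--         if kw in (combined_text if in_combined else summary_text):
--             if best is None or prio < best[0]:
--                 best = (prio, label)
--     return best[1] if best is not None else "verify_fail"
-- ===== Notes on version B (the rewrite author's own statement) =====
-- stated objective: alternative
-- what changed: Replaced the ordered if-cascade by a flat keyword->(priority,scope,label) index scanned with a minimum-priority reduction (no early exit, no rule grouping), and dropped the tests rule's 'build failed'/'deploy failed' guard after proving it dead code ('build'/'deploy' are substrings of those phrases and win at a higher priority).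
import Mathlib
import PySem

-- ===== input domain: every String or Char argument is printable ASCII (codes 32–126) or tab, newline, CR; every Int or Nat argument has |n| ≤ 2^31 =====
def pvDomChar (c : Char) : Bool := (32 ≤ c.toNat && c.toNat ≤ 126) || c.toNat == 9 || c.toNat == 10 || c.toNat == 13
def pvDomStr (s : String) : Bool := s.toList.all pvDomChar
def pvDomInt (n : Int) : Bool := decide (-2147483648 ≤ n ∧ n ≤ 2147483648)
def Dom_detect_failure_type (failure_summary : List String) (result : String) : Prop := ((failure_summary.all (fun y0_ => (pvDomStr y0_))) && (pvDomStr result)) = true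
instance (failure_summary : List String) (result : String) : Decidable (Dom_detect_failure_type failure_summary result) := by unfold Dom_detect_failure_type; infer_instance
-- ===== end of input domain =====

-- B replaces A's ordered keyword cascade by a flat keyword->(priority,label) index scanned
-- with a minimum-priority reduction, with A's dead tests-guard dropped (objective: alternative).


-- ===== PORT A =====
def detect_failure_type (failure_summary : List String) (result : String) : Option String :=
  let summary_text := PySem.Str.lower (PySem.Str.join " " failure_summary)
  let combined_text := summary_text ++ " " ++ PySem.Str.lower result
  if PySem.Str.isIn "permission" combined_text || PySem.Str.isIn "operation not permitted" combined_text then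
    some "permission_denied"
  else if PySem.Str.isIn "runtime_error" summary_text || PySem.Str.isIn "runtime verification" summary_text then
    some "runtime_error"
  else if PySem.Str.isIn "frontend_smoke_failed" summary_text || PySem.Str.isIn "smoke test" summary_text then
    some "frontend_smoke_failed"
  else if PySem.Str.isIn "entrypoint" summary_text || PySem.Str.isIn "frontend_entrypoint" summary_text then
    some "frontend_entry_missing"
  else if PySem.Str.isIn "code_review_failed" summary_text || PySem.Str.isIn "code_review_critical" summary_text then
    some "quality_issue"
  else if PySem.Str.isIn "code_review_goal_misalignment" summary_text then
    some "goal_miss"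
  else if PySem.Str.isIn "no files collected" summary_text || PySem.Str.isIn "file parsing failed" summary_text then
    some "codegen_fail"
  else if PySem.Str.isIn "missing files" summary_text || PySem.Str.isIn "empty files" summary_text then
    some "codegen_fail"
  else if PySem.Str.isIn "no_progress" summary_text then
    some "no_progress"
  else if PySem.Str.isIn "consistency" summary_text || PySem.Str.isIn "compatibility" summary_text then
    some "endpoint_mismatch"
  else if (["404 not found", "connection refused", "network error", "fetch failed", "econnnrefused"].any
            (fun k => PySem.Str.isIn k combined_text)) then
    some "endpoint_mismatch"
  else if PySem.Str.isIn "deploy" summary_text then some "deploy_fail"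
  else if PySem.Str.isIn "build" summary_text then some "build_fail"
  else if PySem.Str.isIn "refactor" summary_text then some "refactor_fail"
  else if PySem.Str.isIn "tests" summary_text || PySem.Str.isIn "test failed" summary_text then
    (if !(PySem.Str.isIn "build failed" summary_text) && !(PySem.Str.isIn "deploy failed" summary_text) then
      some "tests_fail"
     else if PySem.Str.isIn "lint" summary_text then some "lint_fail"
     else if PySem.Str.isIn "quality" summary_text || PySem.Str.isIn "score" summary_text then some "quality_issue"
     else if PySem.Str.isIn "goal" summary_text || PySem.Str.isIn "missing_feature" summary_text then some "goal_miss"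
     else if PySem.Str.isIn "endpoint" summary_text || PySem.Str.isIn "api" summary_text then some "endpoint_mismatch"
     else some "verify_fail")
  else if PySem.Str.isIn "lint" summary_text then some "lint_fail"
  else if PySem.Str.isIn "quality" summary_text || PySem.Str.isIn "score" summary_text then some "quality_issue"
  else if PySem.Str.isIn "goal" summary_text || PySem.Str.isIn "missing_feature" summary_text then some "goal_miss"
  else if PySem.Str.isIn "endpoint" summary_text || PySem.Str.isIn "api" summary_text then some "endpoint_mismatch"
  else some "verify_fail"

-- ===== PORT B =====
-- dict KEYWORD_INDEX: keyword -> (priority, in_combined, label), insertion order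
def pvKeywordIndex : List (String × Nat × Bool × String) :=
  [ ("permission", 0, true, "permission_denied"),
    ("operation not permitted", 0, true, "permission_denied"),
    ("runtime_error", 1, false, "runtime_error"),
    ("runtime verification", 1, false, "runtime_error"),
    ("frontend_smoke_failed", 2, false, "frontend_smoke_failed"),
    ("smoke test", 2, false, "frontend_smoke_failed"),
    ("entrypoint", 3, false, "frontend_entry_missing"),
    ("frontend_entrypoint", 3, false, "frontend_entry_missing"),
    ("code_review_failed", 4, false, "quality_issue"),
    ("code_review_critical", 4, false, "quality_issue"),
    ("code_review_goal_misalignment", 5, false, "goal_miss"),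
    ("no files collected", 6, false, "codegen_fail"),
    ("file parsing failed", 6, false, "codegen_fail"),
    ("missing files", 7, false, "codegen_fail"),
    ("empty files", 7, false, "codegen_fail"),
    ("no_progress", 8, false, "no_progress"),
    ("consistency", 9, false, "endpoint_mismatch"),
    ("compatibility", 9, false, "endpoint_mismatch"),
    ("404 not found", 10, true, "endpoint_mismatch"),
    ("connection refused", 10, true, "endpoint_mismatch"),
    ("network error", 10, true, "endpoint_mismatch"),
    ("fetch failed", 10, true, "endpoint_mismatch"),
    ("econnnrefused", 10, true, "endpoint_mismatch"),
    ("deploy", 11, false, "deploy_fail"),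
    ("build", 12, false, "build_fail"),
    ("refactor", 13, false, "refactor_fail"),
    ("tests", 14, false, "tests_fail"),
    ("test failed", 14, false, "tests_fail"),
    ("lint", 15, false, "lint_fail"),
    ("quality", 16, false, "quality_issue"),
    ("score", 16, false, "quality_issue"),
    ("goal", 17, false, "goal_miss"),
    ("missing_feature", 17, false, "goal_miss"),
    ("endpoint", 18, false, "endpoint_mismatch"),
    ("api", 18, false, "endpoint_mismatch") ]

-- the 'for' loop: minimum-priority reduction over all matching keywords
def pvBestFold (summary_text combined_text : String) :
    Option (Nat × String) → List (String × Nat × Bool × String) → Option (Nat × String)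
  | best, [] => best
  | best, (kw, prio, inC, label) :: rest =>
      let best' :=
        if PySem.Str.isIn kw (if inC then combined_text else summary_text) then
          match best with
          | none => some (prio, label)
          | some (bp, bl) => if prio < bp then some (prio, label) else some (bp, bl)
        else best
      pvBestFold summary_text combined_text best' rest

-- 'best[1] if best is not None else "verify_fail"'
def pvLabelOf : Option (Nat × String) → Option String
  | some (_, label) => some label
  | none => some "verify_fail"

def detect_failure_type_alt (failure_summary : List String) (result : String) : Option String :=
  let summary_text := PySem.Str.lower (PySem.Str.join " " failure_summary)
  let combined_text := summary_text ++ " " ++ PySem.Str.lower result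
  pvLabelOf (pvBestFold summary_text combined_text none pvKeywordIndex)

-- ===== PRECONDITION & SPEC =====
def Spec_detect_failure_type (failure_summary : List String) (result : String) (out : Option String) : Prop := out = detect_failure_type_alt failure_summary result
instance (failure_summary : List String) (result : String) (out : Option String) : Decidable (Spec_detect_failure_type failure_summary result out) := by unfold Spec_detect_failure_type; infer_instance

-- ===== CLAIM =====
def Claim_equal_detect_failure_type : Prop := ∀ (failure_summary : List String) (result : String), Dom_detect_failure_type failure_summary result → Spec_detect_failure_type failure_summary result (detect_failure_type failure_summary result)

-- ===== LEMMAS AND PROOFS =====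

-- a saturated minimum (all remaining priorities ≥ p) is never replaced
theorem pvBestFold_saturated (st ct : String) (p : Nat) (l : String)
    (rules : List (String × Nat × Bool × String)) (h : ∀ r ∈ rules, p ≤ r.2.1) :
    pvBestFold st ct (some (p, l)) rules = some (p, l) := by
  induction rules with
  | nil => rfl
  | cons r rest ih =>
      obtain ⟨kw, prio, inC, label⟩ := r
      have hp : p ≤ prio := h _ (List.mem_cons_self ..)
      have hrest : ∀ r ∈ rest, p ≤ r.2.1 := fun r hr => h r (List.mem_cons_of_mem _ hr)
      rcases Bool.eq_false_or_eq_true (PySem.Str.isIn kw (if inC then ct else st)) with hk | hk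
      · simp only [pvBestFold, hk, if_true, if_neg (Nat.not_lt.mpr hp)]
        exact ih hrest
      · simp only [pvBestFold, hk, Bool.false_eq_true, if_false]
        exact ih hrest

-- first-match view of the min-reduction over a priority-sorted list
def pvFirstHit (st ct : String) : List (String × Nat × Bool × String) → Option (Nat × String)
  | [] => none
  | (kw, prio, inC, label) :: rest =>
      if PySem.Str.isIn kw (if inC then ct else st) then some (prio, label)
      else pvFirstHit st ct rest

theorem pvBestFold_eq_firstHit (st ct : String) (rules : List (String × Nat × Bool × String))
    (h : rules.Pairwise (fun a b => a.2.1 ≤ b.2.1)) :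
    pvBestFold st ct none rules = pvFirstHit st ct rules := by
  induction rules with
  | nil => rfl
  | cons r rest ih =>
      obtain ⟨kw, prio, inC, label⟩ := r
      rw [List.pairwise_cons] at h
      rcases Bool.eq_false_or_eq_true (PySem.Str.isIn kw (if inC then ct else st)) with hk | hk
      · simp only [pvBestFold, pvFirstHit, hk, if_true]
        exact pvBestFold_saturated st ct prio label rest h.1
      · simp only [pvBestFold, pvFirstHit, hk, Bool.false_eq_true, if_false]
        exact ih h.2

theorem pv_isIn_mono {a b : String} (s : String) (hab : a.toList <:+: b.toList)
    (h : PySem.Str.isIn b s = true) : PySem.Str.isIn a s = true := by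
  rw [PySem.Str.isIn_iff_infix] at h ⊢
  exact hab.trans h

theorem pv_or_distrib (a b : Bool) (x y : Option String) :
    (if (a || b) = true then x else y) = if a = true then x else if b = true then x else y := by
  cases a <;> cases b <;> rfl

theorem pvLabelOf_if (c : Prop) [Decidable c] (x y : Option (Nat × String)) :
    pvLabelOf (if c then x else y) = if c then pvLabelOf x else pvLabelOf y := by
  split <;> rfl

theorem pvLabelOf_some (p : Nat) (l : String) : pvLabelOf (some (p, l)) = some l := rfl

theorem pvLabelOf_none : pvLabelOf none = some "verify_fail" := rfl

-- ===== VERDICT =====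
theorem detect_failure_type_spec : Claim_equal_detect_failure_type := by
  intro fs r _
  unfold Spec_detect_failure_type detect_failure_type detect_failure_type_alt
  have hrw : ∀ st ct : String, pvBestFold st ct none pvKeywordIndex = pvFirstHit st ct pvKeywordIndex :=
    fun st ct => pvBestFold_eq_firstHit st ct _ (by decide)
  simp only [hrw]
  simp only [pvKeywordIndex, pvFirstHit, pvLabelOf_if, pvLabelOf_some, pvLabelOf_none,
    List.any_cons, List.any_nil, Bool.or_false, pv_or_distrib]
  set st := PySem.Str.lower (PySem.Str.join " " fs) with hst
  rcases Bool.eq_false_or_eq_true (PySem.Str.isIn "build failed" st) with hbf | hbf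
  · have hb : PySem.Str.isIn "build" st = true :=
      pv_isIn_mono st (by decide) hbf
    simp at hb
    simp [hb]
  · rcases Bool.eq_false_or_eq_true (PySem.Str.isIn "deploy failed" st) with hdf | hdf
    · have hd : PySem.Str.isIn "deploy" st = true :=
        pv_isIn_mono st (by decide) hdf
      simp at hd
      simp [hd]
    · simp at hbf hdf
      simp [hbf, hdf]
      rfl
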